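-- pv_equiv track=rewrite | github.com/rohitamar/wordgames | backend/services/rhyme_match.py | vowels_match
-- ===== SOURCE A (Python) =====
-- SIMILAR_VOWELS = [
--     {"EH", "IH"},
--     {"AE", "EH"},
--     {"AA", "AH", "AO"},
--     {"UH", "UW"},
--     {"IH", "IY"},
-- ]
--
-- def base_phoneme(p):
--     if p[-1].isdigit():
--         return p[:-1]
--     return p
--
-- def vowels_match(v1, v2):
--     b1 = base_phoneme(v1)
--     b2 = base_phoneme(v2)
--
--     if b1 == b2:
--         return True
--
--     for group in SIMILAR_VOWELS:
--         if b1 in group and b2 in group: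
--             return True
--
--     return False
-- ===== SOURCE B (Python) =====
-- # Precomputed direct-neighbour table: one dict lookup per call instead of scanning all groups.
-- _ADJ = {
--     "EH": frozenset({"IH", "AE"}),
--     "IH": frozenset({"EH", "IY"}),
--     "AE": frozenset({"EH"}),
--     "AA": frozenset({"AH", "AO"}),
--     "AH": frozenset({"AA", "AO"}),
--     "AO": frozenset({"AA", "AH"}),
--     "UH": frozenset({"UW"}),
--     "UW": frozenset({"UH"}),
--     "IY": frozenset({"IH"}),
-- }
--
-- def vowels_match(v1, v2):
--     b1 = v1[:-1] if v1[-1].isdigit() else v1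
--     b2 = v2[:-1] if v2[-1].isdigit() else v2
--     return b1 == b2 or b2 in _ADJ.get(b1, frozenset())
-- ===== Notes on version B (the rewrite author's own statement) =====
-- stated objective: alternative
-- what changed: Replaced the per-call scan over all similarity groups with a single lookup in a precomputed dict mapping each phoneme to the frozenset of its direct co-members (no transitive collapsing), and inlined base_phoneme.
import Mathlib
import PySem

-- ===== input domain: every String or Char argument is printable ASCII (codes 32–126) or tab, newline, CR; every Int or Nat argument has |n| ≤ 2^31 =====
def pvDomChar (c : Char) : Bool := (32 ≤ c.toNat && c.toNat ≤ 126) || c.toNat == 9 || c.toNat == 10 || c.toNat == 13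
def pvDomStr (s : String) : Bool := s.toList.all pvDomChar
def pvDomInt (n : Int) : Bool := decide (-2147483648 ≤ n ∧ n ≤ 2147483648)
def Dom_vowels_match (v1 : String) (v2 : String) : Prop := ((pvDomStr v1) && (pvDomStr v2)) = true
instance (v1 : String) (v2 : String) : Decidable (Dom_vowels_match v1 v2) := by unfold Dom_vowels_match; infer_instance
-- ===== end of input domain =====

-- B replaces A's per-call scan over all similarity groups by a single lookup in a
-- precomputed direct-neighbour table (alternative; same behaviour on nonempty inputs).

-- ===== PORT A =====
def SIMILAR_VOWELS : List (PySem.Set String) :=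
  [PySem.Set.ofList ["EH", "IH"],
   PySem.Set.ofList ["AE", "EH"],
   PySem.Set.ofList ["AA", "AH", "AO"],
   PySem.Set.ofList ["UH", "UW"],
   PySem.Set.ofList ["IH", "IY"]]

def base_phoneme (p : String) : String :=
  match PySem.Str.pyGet? p (-1) with
  | some c => if PySem.Chars.isdigit c then PySem.Str.slice p none (some (-1)) else p
  | none => p   -- unreachable under Pre_ (Python raises IndexError on "")

def vowels_match (v1 : String) (v2 : String) : Bool :=
  let b1 := base_phoneme v1
  let b2 := base_phoneme v2
  if b1 == b2 then true
  else if SIMILAR_VOWELS.any (fun g => g.contains b1 && g.contains b2) then true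
  else false

-- ===== PORT B =====
def ADJ : PySem.Dict String (PySem.Set String) :=
  PySem.Dict.ofList
    [("EH", PySem.Set.ofList ["IH", "AE"]),
     ("IH", PySem.Set.ofList ["EH", "IY"]),
     ("AE", PySem.Set.ofList ["EH"]),
     ("AA", PySem.Set.ofList ["AH", "AO"]),
     ("AH", PySem.Set.ofList ["AA", "AO"]),
     ("AO", PySem.Set.ofList ["AA", "AH"]),
     ("UH", PySem.Set.ofList ["UW"]),
     ("UW", PySem.Set.ofList ["UH"]),
     ("IY", PySem.Set.ofList ["IH"])]

def vowels_match_alt (v1 : String) (v2 : String) : Bool :=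
  -- b1/b2 inline A's base_phoneme conditional, as Source B does ('' is IndexError, excluded by Pre_)
  let b1 := match PySem.Str.pyGet? v1 (-1) with
    | some c => if PySem.Chars.isdigit c then PySem.Str.slice v1 none (some (-1)) else v1
    | none => v1
  let b2 := match PySem.Str.pyGet? v2 (-1) with
    | some c => if PySem.Chars.isdigit c then PySem.Str.slice v2 none (some (-1)) else v2
    | none => v2
  b1 == b2 || (PySem.Dict.getD ADJ b1 PySem.Set.empty).contains b2

-- ===== PRECONDITION & SPEC =====
-- Pre_ excludes empty strings, on which Python's p[-1] raises IndexError in both A and B.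
def Pre_vowels_match (v1 : String) (v2 : String) : Prop := v1 ≠ "" ∧ v2 ≠ ""
instance (v1 : String) (v2 : String) : Decidable (Pre_vowels_match v1 v2) := by unfold Pre_vowels_match; infer_instance
def pvWitness_vowels_match : String × String := ("EH1", "IH")

def Spec_vowels_match (v1 : String) (v2 : String) (out : Bool) : Prop := out = vowels_match_alt v1 v2
instance (v1 : String) (v2 : String) (out : Bool) : Decidable (Spec_vowels_match v1 v2 out) := by unfold Spec_vowels_match; infer_instance

-- ===== CLAIM (what is proved, stated in full; the proofs are below) =====
def Claim_equal_vowels_match : Prop := ∀ (v1 : String) (v2 : String), Dom_vowels_match v1 v2 → Pre_vowels_match v1 v2 → Spec_vowels_match v1 v2 (vowels_match v1 v2)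

-- ===== LEMMAS AND PROOFS =====
lemma sv_eq : SIMILAR_VOWELS = [["EH","IH"],["AE","EH"],["AA","AH","AO"],["UH","UW"],["IH","IY"]] := by decide

lemma adj_eq : ADJ = PySem.Dict.mk [("EH",["IH","AE"]),("IH",["EH","IY"]),("AE",["EH"]),("AA",["AH","AO"]),("AH",["AA","AO"]),("AO",["AA","AH"]),("UH",["UW"]),("UW",["UH"]),("IY",["IH"])] := by decide

lemma core_eq (b1 b2 : String) :
    (if b1 == b2 then true
     else if SIMILAR_VOWELS.any (fun g => g.contains b1 && g.contains b2) then true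
     else false)
    = (b1 == b2 || (PySem.Dict.getD ADJ b1 PySem.Set.empty).contains b2) := by
  by_cases heq : b1 = b2
  · subst heq; simp
  · have hbe : (b1 == b2) = false := by simp [heq]
    simp only [hbe, Bool.false_or]
    by_cases h1 : b1 = "EH"
    · subst h1; simp [sv_eq, adj_eq, PySem.Dict.getD, PySem.Dict.get?, Ne.symm heq]
    by_cases h2 : b1 = "IH"
    · subst h2; simp [sv_eq, adj_eq, PySem.Dict.getD, PySem.Dict.get?, Ne.symm heq]
    by_cases h3 : b1 = "AE"
    · subst h3; simp [sv_eq, adj_eq, PySem.Dict.getD, PySem.Dict.get?, Ne.symm heq]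
    by_cases h4 : b1 = "AA"
    · subst h4; simp [sv_eq, adj_eq, PySem.Dict.getD, PySem.Dict.get?, Ne.symm heq]
    by_cases h5 : b1 = "AH"
    · subst h5; simp [sv_eq, adj_eq, PySem.Dict.getD, PySem.Dict.get?, Ne.symm heq]
    by_cases h6 : b1 = "AO"
    · subst h6; simp [sv_eq, adj_eq, PySem.Dict.getD, PySem.Dict.get?, Ne.symm heq]
    by_cases h7 : b1 = "UH"
    · subst h7; simp [sv_eq, adj_eq, PySem.Dict.getD, PySem.Dict.get?, Ne.symm heq]
    by_cases h8 : b1 = "UW"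
    · subst h8; simp [sv_eq, adj_eq, PySem.Dict.getD, PySem.Dict.get?, Ne.symm heq]
    by_cases h9 : b1 = "IY"
    · subst h9; simp [sv_eq, adj_eq, PySem.Dict.getD, PySem.Dict.get?, Ne.symm heq]
    · simp [sv_eq, adj_eq, PySem.Dict.getD, PySem.Dict.get?, PySem.Set.empty,
            h1, h2, h3, h4, h5, h6, h7, h8, h9,
            Ne.symm h1, Ne.symm h2, Ne.symm h3, Ne.symm h4, Ne.symm h5,
            Ne.symm h6, Ne.symm h7, Ne.symm h8, Ne.symm h9]

-- ===== VERDICT (by name: the statement is the Claim_ definition above) =====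
theorem vowels_match_spec : Claim_equal_vowels_match := by
  intro v1 v2 _ _
  unfold Spec_vowels_match vowels_match vowels_match_alt base_phoneme
  exact core_eq _ _
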